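-- pv_equiv track=rewrite | github.com/brukhabtu/ast | tests/factories.py | create_deeply_nested_code
-- ===== SOURCE A (Python) =====
-- def create_deeply_nested_code(depth: int = 5) -> str:
--     """Create deeply nested code structure."""
--     indent = "    "
--     code_lines = ["def outer():"]
--
--     for i in range(depth):
--         level_indent = indent * (i + 1)
--         if i < depth - 1:
--             code_lines.append(f"{level_indent}def level_{i}():")
--         else:
--             code_lines.append(f"{level_indent}return {i}")
--
--     # Add calls back up
--     for i in range(depth - 2, -1, -1):
--         level_indent = indent * (i + 2)
--         code_lines.append(f"{level_indent}return level_{i}()")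
--
--     code_lines.append(f"{indent}return level_0()")
--     return "\n".join(code_lines)
-- ===== SOURCE B (Python) =====
-- def create_deeply_nested_code(depth: int = 5) -> str:
--     """Create deeply nested code structure (recursive construction)."""
--     indent = "    "
--
--     def rec(i, ind):
--         if i == depth - 1:
--             return [ind + f"return {i}"]
--         return ([ind + f"def level_{i}():"]
--                 + rec(i + 1, ind + indent)
--                 + [ind + indent + f"return level_{i}()"])
--
--     lines = ["def outer():"]
--     if depth >= 1:
--         lines += rec(0, indent)
--     lines.append(indent + "return level_0()")
--     return "\n".join(lines)
-- ===== Notes on version B (the rewrite author's own statement) =====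
-- stated objective: alternative
-- what changed: Replaced A's two flat index loops (one descending to emit def lines, one ascending-back to emit return calls) with a single recursive helper that builds each nesting level's def line, its recursively built inner body, and its trailing return call in one pass.
import Mathlib
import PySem

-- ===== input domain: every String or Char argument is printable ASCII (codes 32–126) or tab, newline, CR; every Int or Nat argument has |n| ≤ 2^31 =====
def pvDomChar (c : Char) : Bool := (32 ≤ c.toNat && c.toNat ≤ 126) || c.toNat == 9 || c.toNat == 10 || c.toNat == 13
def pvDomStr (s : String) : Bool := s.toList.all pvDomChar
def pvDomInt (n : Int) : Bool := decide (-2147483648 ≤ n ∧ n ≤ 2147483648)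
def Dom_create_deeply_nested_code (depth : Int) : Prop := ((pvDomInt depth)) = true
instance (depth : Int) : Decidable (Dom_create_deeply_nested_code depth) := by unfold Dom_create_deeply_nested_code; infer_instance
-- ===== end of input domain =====

-- B replaces A's two flat loops with one recursive helper building each level's def line,
-- inner body and trailing return call together (objective: alternative decomposition).

-- ===== PORT A =====
def create_deeply_nested_code (depth : Int) : String :=
  let indent : List Char := "    ".toList
  let code_lines : List (List Char) := ["def outer():".toList]
  let code_lines := (PySem.List.pyRange 0 depth 1).foldl (fun acc i =>
      let level_indent := PySem.List.pyRepeat indent (i + 1)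
      if i < depth - 1 then
        acc ++ [level_indent ++ "def level_".toList ++ PySem.Int.toChars i ++ "():".toList]
      else
        acc ++ [level_indent ++ "return ".toList ++ PySem.Int.toChars i]) code_lines
  let code_lines := (PySem.List.pyRange (depth - 2) (-1) (-1)).foldl (fun acc i =>
      let level_indent := PySem.List.pyRepeat indent (i + 2)
      acc ++ [level_indent ++ "return level_".toList ++ PySem.Int.toChars i ++ "()".toList]) code_lines
  let code_lines := code_lines ++ [indent ++ "return level_0()".toList]
  String.ofList (PySem.Chars.join "\n".toList code_lines)

-- ===== PORT B =====
-- rec(i, ind) of Source B; the Nat argument is the structural fuel (depth - 1 - i),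
-- so `n = 0` is exactly Source B's base case `i == depth - 1`.
def pvRecB (n : Nat) (i : Int) (ind : List Char) : List (List Char) :=
  match n with
  | 0 => [ind ++ "return ".toList ++ PySem.Int.toChars i]
  | n + 1 =>
      (ind ++ "def level_".toList ++ PySem.Int.toChars i ++ "():".toList)
        :: (pvRecB n (i + 1) (ind ++ "    ".toList)
            ++ [ind ++ "    ".toList ++ "return level_".toList ++ PySem.Int.toChars i ++ "()".toList])

def create_deeply_nested_code_alt (depth : Int) : String :=
  let indent : List Char := "    ".toList
  let lines : List (List Char) :=
    "def outer():".toList ::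
      (if 1 ≤ depth then pvRecB (depth - 1).toNat 0 indent else [])
  let lines := lines ++ [indent ++ "return level_0()".toList]
  String.ofList (PySem.Chars.join "\n".toList lines)

-- ===== PRECONDITION & SPEC =====
def Spec_create_deeply_nested_code (depth : Int) (out : String) : Prop := out = create_deeply_nested_code_alt depth
instance (depth : Int) (out : String) : Decidable (Spec_create_deeply_nested_code depth out) := by unfold Spec_create_deeply_nested_code; infer_instance

-- ===== CLAIM (what is proved, stated in full; the proofs are below) =====
def Claim_equal_create_deeply_nested_code : Prop := ∀ (depth : Int), Dom_create_deeply_nested_code depth → Spec_create_deeply_nested_code depth (create_deeply_nested_code depth)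

-- ===== LEMMAS AND PROOFS =====

theorem pv_foldl_app_map {α β : Type} (l : List α) (f : α → List β) (init : List (List β)) :
    l.foldl (fun acc x => acc ++ [f x]) init = init ++ l.map f := by
  induction l generalizing init with
  | nil => simp
  | cons x xs ih => simp [List.foldl_cons, ih]

theorem pv_pyRepeat_succ {α : Type} (xs : List α) (n : Int) (hn : 0 ≤ n) :
    PySem.List.pyRepeat xs (n + 1) = PySem.List.pyRepeat xs n ++ xs := by
  unfold PySem.List.pyRepeat
  have : (n + 1).toNat = n.toNat + 1 := by omega
  rw [this, List.replicate_succ', List.flatten_append]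
  simp

-- A's first loop line for index i (the if pulled into the appended element)
def pvLineDown (d i : Int) : List Char :=
  if i < d - 1 then
    PySem.List.pyRepeat "    ".toList (i + 1) ++ "def level_".toList ++ PySem.Int.toChars i ++ "():".toList
  else
    PySem.List.pyRepeat "    ".toList (i + 1) ++ "return ".toList ++ PySem.Int.toChars i

-- A's second loop line for index i
def pvLineUp (i : Int) : List Char :=
  PySem.List.pyRepeat "    ".toList (i + 2) ++ "return level_".toList ++ PySem.Int.toChars i ++ "()".toList

-- core correspondence between A's two flat passes and B's recursion
theorem pv_rec_eq (d : Int) : ∀ (k : Nat) (i : Int), 0 ≤ i → i + k = d - 1 →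
    (PySem.List.pyRange i d 1).map (pvLineDown d)
      ++ (PySem.List.pyRange (d - 2) (i - 1) (-1)).map pvLineUp
    = pvRecB k i (PySem.List.pyRepeat "    ".toList (i + 1)) := by
  intro k
  induction k with
  | zero =>
      intro i hi hk
      have hd : d = i + 1 := by omega
      subst hd
      rw [PySem.List.pyRange_one_singleton, PySem.List.pyRange_neg_one_eq_nil (by omega)]
      simp [pvRecB, pvLineDown]
  | succ k ih =>
      intro i hi hk
      have h1 : i < d - 1 := by omega
      rw [PySem.List.pyRange_one_cons (by omega : i < d)]
      have h2 : PySem.List.pyRange (d - 2) (i - 1) (-1)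
          = PySem.List.pyRange (d - 2) i (-1) ++ [i] := by
        rw [PySem.List.pyRange_neg_one_eq_reverse, PySem.List.pyRange_neg_one_eq_reverse]
        have e1 : i - 1 + 1 = i := by omega
        have e2 : d - 2 + 1 = d - 1 := by omega
        rw [e1, e2]
        rw [PySem.List.pyRange_one_cons (by omega : i < d - 1)]
        simp
      rw [h2]
      have hIH := ih (i + 1) (by omega) (by omega)
      have hrep : PySem.List.pyRepeat "    ".toList (i + 1) ++ "    ".toList
          = PySem.List.pyRepeat "    ".toList (i + 1 + 1) := by
        rw [pv_pyRepeat_succ _ (i + 1) (by omega)]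
      have e3 : i + 1 - 1 = i := by omega
      rw [e3] at hIH
      rw [List.map_cons, List.map_append, List.map_singleton, List.cons_append,
        ← List.append_assoc, hIH]
      simp only [pvRecB, pvLineDown, pvLineUp, if_pos h1, hrep]
      simp only [List.append_assoc]
      rw [show (i : Int) + 2 = i + 1 + 1 from by omega]

-- the fold bodies of port A are the canonical "append one mapped line" folds
theorem pv_foldA_down (d : Int) (init : List (List Char)) :
    (PySem.List.pyRange 0 d 1).foldl (fun acc i =>
        let level_indent := PySem.List.pyRepeat "    ".toList (i + 1)
        if i < d - 1 then
          acc ++ [level_indent ++ "def level_".toList ++ PySem.Int.toChars i ++ "():".toList]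
        else
          acc ++ [level_indent ++ "return ".toList ++ PySem.Int.toChars i]) init
      = init ++ (PySem.List.pyRange 0 d 1).map (pvLineDown d) := by
  have hfun : (fun (acc : List (List Char)) (i : Int) =>
      let level_indent := PySem.List.pyRepeat "    ".toList (i + 1)
      if i < d - 1 then
        acc ++ [level_indent ++ "def level_".toList ++ PySem.Int.toChars i ++ "():".toList]
      else
        acc ++ [level_indent ++ "return ".toList ++ PySem.Int.toChars i])
      = fun acc i => acc ++ [pvLineDown d i] := by
    funext acc x
    by_cases h : x < d - 1 <;> simp [pvLineDown, h]
  rw [hfun, pv_foldl_app_map]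

theorem pv_foldA_up (d : Int) (init : List (List Char)) :
    (PySem.List.pyRange (d - 2) (-1) (-1)).foldl (fun acc i =>
        let level_indent := PySem.List.pyRepeat "    ".toList (i + 2)
        acc ++ [level_indent ++ "return level_".toList ++ PySem.Int.toChars i ++ "()".toList]) init
      = init ++ (PySem.List.pyRange (d - 2) (-1) (-1)).map pvLineUp := by
  have hfun : (fun (acc : List (List Char)) (i : Int) =>
      let level_indent := PySem.List.pyRepeat "    ".toList (i + 2)
      acc ++ [level_indent ++ "return level_".toList ++ PySem.Int.toChars i ++ "()".toList])
      = fun acc i => acc ++ [pvLineUp i] := by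
    funext acc x
    simp [pvLineUp]
  rw [hfun, pv_foldl_app_map]

-- ===== VERDICT (by name: the statement is the Claim_ definition above) =====
theorem create_deeply_nested_code_spec : Claim_equal_create_deeply_nested_code := by
  intro depth _
  unfold Spec_create_deeply_nested_code create_deeply_nested_code create_deeply_nested_code_alt
  dsimp only
  rw [pv_foldA_down, pv_foldA_up]
  by_cases hd : 1 ≤ depth
  · have h0 : (0 : Int) + (depth - 1).toNat = depth - 1 := by omega
    have := pv_rec_eq depth (depth - 1).toNat 0 le_rfl h0
    have hrep1 : PySem.List.pyRepeat "    ".toList (0 + 1) = "    ".toList := by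
      simp [PySem.List.pyRepeat]
    rw [hrep1] at this
    have hm1 : (0 : Int) - 1 = -1 := by omega
    rw [hm1] at this
    rw [if_pos hd, ← this]
    simp [List.append_assoc]
  · rw [PySem.List.pyRange_one_eq_nil (by omega), PySem.List.pyRange_neg_one_eq_nil (by omega)]
    simp [hd]
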